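-- pv_equiv track=rewrite | github.com/robynskyrme/scrapbook | mwh_dates-fixer.py | copy_add
-- ===== SOURCE A (Python) =====
-- extra = "A.D."
--
-- def isnum(c):
--     if ord(c) < 48 or ord(c) > 57:
--         return False
--     return True
--
-- def copy_add(text):
--     new = ""
--
--     pointer = 0
--     numcount = 0
--
--     while pointer < len(text):
--         new += text[pointer]
--         if isnum(text[pointer]):
--             numcount += 1
--         else:
--             numcount = 0
--
--
--         if numcount > 3:
--             new += extra
--
--         pointer += 1
--
--     return new
-- ===== SOURCE B (Python) =====
-- extra = "A.D."
--
-- def copy_add(text):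
--     # Stateless lookbehind: a digit gets "A.D." after it exactly when it and
--     # its three predecessors in the original text are all ASCII digits.
--     return "".join(
--         c + (extra if i >= 3 and all('0' <= d <= '9' for d in text[i-3:i+1]) else "")
--         for i, c in enumerate(text))
-- ===== Notes on version B (the rewrite author's own statement) =====
-- stated objective: faster
-- what changed: A's stateful while-loop building the result with repeated string += under a running digit counter is replaced by a single join over a stateless comprehension that decides each insertion by a fixed 4-character lookbehind window on the original text.
import Mathlib
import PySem

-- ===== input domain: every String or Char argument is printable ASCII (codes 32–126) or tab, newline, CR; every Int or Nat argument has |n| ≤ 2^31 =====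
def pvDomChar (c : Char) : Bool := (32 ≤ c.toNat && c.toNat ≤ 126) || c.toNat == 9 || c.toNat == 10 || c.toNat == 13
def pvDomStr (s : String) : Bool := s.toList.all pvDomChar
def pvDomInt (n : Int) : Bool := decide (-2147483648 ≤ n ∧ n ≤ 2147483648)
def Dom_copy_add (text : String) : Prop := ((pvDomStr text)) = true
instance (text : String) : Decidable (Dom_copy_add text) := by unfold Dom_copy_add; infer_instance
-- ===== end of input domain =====

-- B replaces A's stateful counter loop by a stateless per-position lookbehind (idiomatic join-comprehension); same output everywhere.

-- ===== PORT A =====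
def pvExtra : List Char := ['A', '.', 'D', '.']

def isnum (c : Char) : Bool :=
  if c.toNat < 48 ∨ c.toNat > 57 then false else true

def copyAddGo : List Char → Nat → List Char → List Char
  | [], _, new => new
  | c :: rest, numcount, new =>
    let new := new ++ [c]
    let numcount := if isnum c then numcount + 1 else 0
    let new := if numcount > 3 then new ++ pvExtra else new
    copyAddGo rest numcount new

def copy_add (text : String) : String :=
  String.mk (copyAddGo text.toList 0 [])

-- ===== PORT B =====
def pvDig (c : Char) : Bool := decide ('0' ≤ c) && decide (c ≤ '9')

def copy_add_alt (text : String) : String :=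
  let cs := text.toList
  String.mk ((PySem.List.enumerate cs).flatMap (fun ic =>
    ic.2 :: (if 3 ≤ ic.1 ∧ (PySem.List.slice cs (some (ic.1 - 3)) (some (ic.1 + 1))).all pvDig = true
             then pvExtra else [])))

-- ===== PRECONDITION & SPEC =====
def Spec_copy_add (text : String) (out : String) : Prop := out = copy_add_alt text
instance (text : String) (out : String) : Decidable (Spec_copy_add text out) := by unfold Spec_copy_add; infer_instance

-- ===== CLAIM (what is proved, stated in full; the proofs are below) =====
def Claim_equal_copy_add : Prop := ∀ (text : String), Dom_copy_add text → Spec_copy_add text (copy_add text)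

-- ===== LEMMAS AND PROOFS =====

-- reference run-length recursion shared by both proofs
def runF : Nat → List Char → List Char
  | _, [] => []
  | cnt, c :: rest =>
    let n := if isnum c then cnt + 1 else 0
    c :: ((if n > 3 then pvExtra else []) ++ runF n rest)

theorem zero_le_char (c : Char) : ('0' ≤ c) ↔ 48 ≤ c.toNat := by
  rw [Char.le_def, UInt32.le_iff_toNat_le]; exact Iff.rfl

theorem char_le_nine (c : Char) : (c ≤ '9') ↔ c.toNat ≤ 57 := by
  rw [Char.le_def, UInt32.le_iff_toNat_le]; exact Iff.rfl

theorem isnum_eq_pvDig (c : Char) : isnum c = pvDig c := by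
  simp only [isnum, pvDig]
  by_cases h : c.toNat < 48 ∨ c.toNat > 57
  · rw [if_pos h]
    rcases h with h | h
    · simp [zero_le_char c]; omega
    · simp [char_le_nine c]; intro; omega
  · rw [if_neg h]
    push_neg at h
    simp [zero_le_char c, char_le_nine c]; omega

theorem copyAddGo_eq (l : List Char) : ∀ (cnt : Nat) (acc : List Char),
    copyAddGo l cnt acc = acc ++ runF cnt l := by
  induction l with
  | nil => intro cnt acc; simp [copyAddGo, runF]
  | cons c rest ih =>
    intro cnt acc
    simp only [copyAddGo, runF]
    by_cases hc : isnum c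
    · by_cases h3 : cnt + 1 > 3
      · simp [hc, h3, ih]
      · simp [hc, h3, ih]
    · simp [hc, ih]

-- B's flatMap over enumerate as an index recursion
def bAux (cs : List Char) : Int → List Char → List Char
  | _, [] => []
  | i, c :: rest =>
    c :: ((if 3 ≤ i ∧ (PySem.List.slice cs (some (i - 3)) (some (i + 1))).all pvDig = true
           then pvExtra else []) ++ bAux cs (i + 1) rest)

theorem enumerate_flatMap_eq (cs : List Char) (l : List Char) : ∀ (i : Int),
    (PySem.List.enumerate l i).flatMap (fun ic =>
      ic.2 :: (if 3 ≤ ic.1 ∧ (PySem.List.slice cs (some (ic.1 - 3)) (some (ic.1 + 1))).all pvDig = true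
               then pvExtra else [])) = bAux cs i l := by
  induction l with
  | nil => intro i; simp [PySem.List.enumerate_nil, bAux]
  | cons c rest ih =>
    intro i
    simp only [PySem.List.enumerate_cons, List.flatMap_cons, bAux, ih, List.cons_append]

-- invariant: cnt counts the trailing digit run, graded up to 3
def RunInv (p : List Char) (cnt : Nat) : Prop :=
  ∀ k : Nat, k ≤ 3 → (k ≤ cnt ↔ (k ≤ p.length ∧ (p.drop (p.length - k)).all pvDig = true))

theorem bAux_eq_runF (l : List Char) : ∀ (p : List Char) (cnt : Nat), RunInv p cnt →
    bAux (p ++ l) (p.length : Int) l = runF cnt l := by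
  induction l with
  | nil => intro p cnt _; simp [bAux, runF]
  | cons c rest ih =>
    intro p cnt hInv
    have hcast : ((p ++ [c]).length : Int) = (p.length : Int) + 1 := by simp
    have hsplit : p ++ c :: rest = (p ++ [c]) ++ rest := by simp
    set n : Nat := if isnum c then cnt + 1 else 0 with hn
    -- the new invariant
    have hInv' : RunInv (p ++ [c]) n := by
      intro k hk
      cases k with
      | zero => simp
      | succ k' =>
        by_cases hc : isnum c
        · have hd : pvDig c = true := by rw [← isnum_eq_pvDig]; exact hc
          have hk' := hInv k' (by omega)
          simp only [hn, if_pos hc]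
          have hdrop : k' ≤ p.length → (p ++ [c]).drop ((p ++ [c]).length - (k' + 1)) =
              p.drop (p.length - k') ++ [c] := by
            intro hlk
            have hlen : (p ++ [c]).length - (k' + 1) = p.length - k' := by
              simp only [List.length_append, List.length_cons, List.length_nil]; omega
            rw [hlen, List.drop_append_of_le_length (by omega)]
          constructor
          · intro hle
            have hp := hk'.mp (by omega)
            refine ⟨by simp only [List.length_append, List.length_cons, List.length_nil]; omega, ?_⟩
            rw [hdrop hp.1, List.all_append]
            simp [hp.2, hd]
          · intro ⟨hlen, hall⟩
            have hlen' : k' ≤ p.length := by simp at hlen; omega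
            rw [hdrop hlen', List.all_append, Bool.and_eq_true] at hall
            have := hk'.mpr ⟨hlen', hall.1⟩
            omega
        · have hd : pvDig c = false := by
            rw [← isnum_eq_pvDig]; exact Bool.eq_false_iff.mpr hc
          simp only [hn, if_neg hc]
          constructor
          · omega
          · intro ⟨hlen, hall⟩
            exfalso
            have hlen' : k' ≤ p.length := by simp at hlen; omega
            have hdrop : (p ++ [c]).drop ((p ++ [c]).length - (k' + 1)) =
                p.drop (p.length - k') ++ [c] := by
              have h2 : (p ++ [c]).length - (k' + 1) = p.length - k' := by
                simp only [List.length_append, List.length_cons, List.length_nil]; omega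
              rw [h2, List.drop_append_of_le_length (by omega)]
            rw [hdrop, List.all_append] at hall
            simp [hd] at hall
    -- the inserted-segment condition agrees
    have hcond : (3 ≤ (p.length : Int) ∧
        (PySem.List.slice (p ++ c :: rest) (some ((p.length : Int) - 3)) (some ((p.length : Int) + 1))).all pvDig = true)
        ↔ n > 3 := by
      by_cases h3 : 3 ≤ p.length
      · have e1 : ((p.length : Int) - 3) = ((p.length - 3 : Nat) : Int) := by omega
        have e2 : ((p.length : Int) + 1) = ((p.length + 1 : Nat) : Int) := by omega
        have hslice : PySem.List.slice (p ++ c :: rest) (some ((p.length : Int) - 3)) (some ((p.length : Int) + 1)) =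
            p.drop (p.length - 3) ++ [c] := by
          rw [e1, e2, PySem.List.slice_natCast]
          rw [List.drop_append_of_le_length (by omega)]
          have hlen3 : (p.drop (p.length - 3)).length = 3 := by simp; omega
          have h4 : p.length + 1 - (p.length - 3) = (p.drop (p.length - 3)).length + 1 := by omega
          rw [h4, List.take_append]
          simp
        rw [hslice, List.all_append]
        have h33 := hInv 3 (by omega)
        by_cases hc : isnum c
        · have hd : pvDig c = true := by rw [← isnum_eq_pvDig]; exact hc
          simp only [hn, if_pos hc]
          constructor
          · intro ⟨_, hall⟩
            rw [Bool.and_eq_true] at hall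
            have := h33.mpr ⟨h3, hall.1⟩
            omega
          · intro hgt
            have := h33.mp (by omega)
            refine ⟨by omega, ?_⟩
            simp [hd, this.2]
        · have hd : pvDig c = false := by
            rw [← isnum_eq_pvDig]; exact Bool.eq_false_iff.mpr hc
          simp only [hn, if_neg hc]
          constructor
          · intro ⟨_, hall⟩
            simp [hd] at hall
          · omega
      · constructor
        · intro ⟨h, _⟩; exfalso; omega
        · intro hgt
          exfalso
          by_cases hc : isnum c
          · simp only [hn, if_pos hc] at hgt
            have := (hInv 3 (by omega)).mp (by omega)
            omega
          · simp only [hn, if_neg hc] at hgt; omega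
    -- assemble
    show bAux (p ++ c :: rest) (p.length : Int) (c :: rest) = runF cnt (c :: rest)
    simp only [bAux, runF]
    have htail : bAux (p ++ c :: rest) ((p.length : Int) + 1) rest = runF n rest := by
      rw [hsplit, ← hcast]
      exact ih (p ++ [c]) n hInv'
    have hif : (if 3 ≤ (p.length : Int) ∧
        (PySem.List.slice (p ++ c :: rest) (some ((p.length : Int) - 3)) (some ((p.length : Int) + 1))).all pvDig = true
        then pvExtra else []) = (if n > 3 then pvExtra else []) := by
      by_cases hcnd : n > 3
      · rw [if_pos (hcond.mpr hcnd), if_pos hcnd]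
      · rw [if_neg (fun h => hcnd (hcond.mp h)), if_neg hcnd]
    rw [htail, hif]

theorem runInv_nil : RunInv [] 0 := by
  intro k hk
  simp

-- ===== VERDICT (by name: the statement is the Claim_ definition above) =====
theorem copy_add_spec : Claim_equal_copy_add := by
  intro text _
  show copy_add text = copy_add_alt text
  show String.mk (copyAddGo text.toList 0 []) =
    String.mk ((PySem.List.enumerate text.toList 0).flatMap (fun ic =>
      ic.2 :: (if 3 ≤ ic.1 ∧ (PySem.List.slice text.toList (some (ic.1 - 3)) (some (ic.1 + 1))).all pvDig = true
               then pvExtra else [])))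
  rw [copyAddGo_eq, enumerate_flatMap_eq text.toList text.toList 0]
  have h := bAux_eq_runF text.toList [] 0 runInv_nil
  simp only [List.nil_append, List.length_nil, Nat.cast_zero] at h ⊢
  rw [h]
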